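-- pv_equiv track=rewrite | github.com/rickur1993/streamlit_websearch | Websearch.py | _post_process_simple
-- ===== SOURCE A (Python) =====
-- from typing import Dict, Any, List, Optional
--
-- def _post_process_simple(response_text: str, analysis: Dict[str, str]) -> str:
--     """Simple post-processing without regex - fixed to prevent duplication"""
--
--     if not response_text:
--         return response_text
--
--     # Split into lines and remove any existing duplicates
--     lines = response_text.split('\n')
--     processed_lines = []
--     seen_headers = set()
--
--     i = 0
--     while i < len(lines):
--         line = lines[i].strip()
--
--         # Skip empty lines at the beginning
--         if not line and not processed_lines:
--             i += 1
--             continue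
--
--         # Check for numbered headers
--         if line and any(line.startswith(f'{j}.') for j in range(1, 10)):
--             # Check if this header was already seen
--             header_key = line.split('.')[0] + '.'
--             if header_key in seen_headers:
--                 # Skip this duplicate section entirely
--                 i += 1
--                 # Skip until next header or end
--                 while i < len(lines) and not any(lines[i].strip().startswith(f'{k}.') for k in range(1, 10)):
--                     i += 1
--                 continue
--
--             seen_headers.add(header_key)
--
--             # Format header properly
--             if not line.startswith('##'):
--                 processed_lines.append(f"## {line}")
--             else:
--                 processed_lines.append(line)
--         else:
--             processed_lines.append(line)
--
--         i += 1
--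
--     # Reconstruct and clean up
--     formatted_response = '\n'.join(processed_lines)
--
--     # Fix spacing
--     formatted_response = formatted_response.replace('\n## ', '\n\n## ')
--
--     # Remove excessive newlines
--     while '\n\n\n' in formatted_response:
--         formatted_response = formatted_response.replace('\n\n\n', '\n\n')
--
--     return formatted_response.strip()
-- ===== SOURCE B (Python) =====
-- from typing import Dict, Any, List, Optional
--
-- def _is_header(line: str) -> bool:
--     return any(line.startswith(f'{j}.') for j in range(1, 10))
--
-- def _split_leading(lines):
--     """Split into (prefix of non-header lines, rest starting at the first header)."""
--     for idx, l in enumerate(lines):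
--         if _is_header(l):
--             return lines[:idx], lines[idx:]
--     return lines, []
--
-- def _post_process_simple(response_text: str, analysis: Dict[str, str]) -> str:
--     if not response_text:
--         return response_text
--
--     lines = [l.strip() for l in response_text.split('\n')]
--
--     # Partition into a leading block and (header, body) sections.
--     leading, rest = _split_leading(lines)
--     sections = []
--     while rest:
--         header, tail = rest[0], rest[1:]
--         body, rest = _split_leading(tail)
--         sections.append((header, body))
--
--     # Drop empty lines at the very start, keep the rest of the leading block.
--     first = 0
--     while first < len(leading) and not leading[first]:
--         first += 1
--     out = leading[first:]
--
--     # Emit each section once, keyed by its number.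
--     seen = set()
--     for header, body in sections:
--         key = header.split('.')[0] + '.'
--         if key not in seen:
--             seen.add(key)
--             out.append('## ' + header)
--             out.extend(body)
--
--     text = '\n'.join(out)
--     text = text.replace('\n## ', '\n\n## ')
--     while '\n\n\n' in text:
--         text = text.replace('\n\n\n', '\n\n')
--     return text.strip()
-- ===== Notes on version B (the rewrite author's own statement) =====
-- stated objective: simpler
-- what changed: B first partitions the stripped lines into a leading block and explicit (header, body) sections, then emits the leading block (minus its empty prefix) and each section once keyed by its number, instead of A's single index-driven while-loop with an inner skip-scan and emitted-so-far state.
import Mathlib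
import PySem

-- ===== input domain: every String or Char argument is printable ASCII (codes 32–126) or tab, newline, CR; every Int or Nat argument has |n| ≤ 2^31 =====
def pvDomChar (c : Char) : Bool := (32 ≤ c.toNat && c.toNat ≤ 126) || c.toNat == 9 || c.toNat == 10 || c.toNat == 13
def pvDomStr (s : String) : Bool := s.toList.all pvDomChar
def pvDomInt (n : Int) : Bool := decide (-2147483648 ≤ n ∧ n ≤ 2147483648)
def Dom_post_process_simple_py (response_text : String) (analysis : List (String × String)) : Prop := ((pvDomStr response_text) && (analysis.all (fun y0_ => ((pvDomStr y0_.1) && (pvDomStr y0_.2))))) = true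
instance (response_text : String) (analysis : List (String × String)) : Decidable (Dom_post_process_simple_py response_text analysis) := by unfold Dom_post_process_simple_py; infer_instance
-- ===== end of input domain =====

-- B re-decomposes A's index-driven dedup loop into partition-into-sections + emit-once; same output, no speed claim.

-- ===== SHARED HELPERS (identical code in both Pythons: header test, key, final cleanup) =====
-- any(line.startswith(f'{j}.') for j in range(1, 10))
def pvIsHeader (line : String) : Bool :=
  (PySem.List.pyRange 1 10 1).any (fun j => PySem.Str.startswith line (PySem.Int.toStr j ++ "."))

-- s.split(sep) for a NONEMPTY literal sep ("\n" / "."), where split? is never none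
def pvSplit (s sep : String) : List String :=
  (PySem.Str.split? s sep).getD []

-- line.split('.')[0] + '.'
def pvHeaderKey (line : String) : String :=
  ((pvSplit line ".").headD "") ++ "."

-- while '\n\n\n' in s: s = s.replace('\n\n\n', '\n\n')  — fuel only makes the loop total:
-- each replace with the pattern present shortens s, so length+1 iterations always suffice.
def pvCollapse : Nat → String → String
  | 0, s => s
  | fuel + 1, s =>
    if PySem.Str.isIn "\n\n\n" s = true then pvCollapse fuel (PySem.Str.replace s "\n\n\n" "\n\n")
    else s

-- '\n'.join(...) ; fix spacing ; collapse newlines ; strip  (the common tail of both Pythons)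
def pvFinalize (ls : List String) : String :=
  let f := PySem.Str.join "\n" ls
  let f := PySem.Str.replace f "\n## " "\n\n## "
  PySem.Str.strip (pvCollapse (f.toList.length + 1) f)

-- ===== PORT A =====
-- inner skip: while i < len(lines) and not any(lines[i].strip().startswith(...)): i += 1
def pvSkip : List String → List String
  | [] => []
  | l :: rest => if pvIsHeader (PySem.Str.strip l) = true then l :: rest else pvSkip rest

theorem pvSkip_length_le (xs : List String) : (pvSkip xs).length ≤ xs.length := by
  induction xs with
  | nil => simp [pvSkip]
  | cons l rest ih =>
      simp only [pvSkip]
      split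
      · exact le_refl _
      · exact Nat.le_succ_of_le ih

-- the main while-loop of A: i ↦ remaining suffix, processed_lines ↦ acc, seen_headers ↦ seen
def pvALoop : List String → List String → PySem.Set String → List String
  | [], acc, _ => acc
  | l :: rest, acc, seen =>
    let line := PySem.Str.strip l
    if line = "" ∧ acc = [] then
      pvALoop rest acc seen
    else if line ≠ "" ∧ pvIsHeader line = true then
      let key := pvHeaderKey line
      if PySem.Set.contains seen key = true then
        pvALoop (pvSkip rest) acc seen
      else if ¬ (PySem.Str.startswith line "##" = true) then
        pvALoop rest (acc ++ ["## " ++ line]) (PySem.Set.add seen key)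
      else
        pvALoop rest (acc ++ [line]) (PySem.Set.add seen key)
    else
      pvALoop rest (acc ++ [line]) seen
termination_by raw _ _ => raw.length
decreasing_by
  all_goals simp only [List.length_cons]
  all_goals first
    | omega
    | exact Nat.lt_succ_of_le (pvSkip_length_le rest)

def post_process_simple_py (response_text : String) (analysis : List (String × String)) : String :=
  if response_text = "" then response_text
  else pvFinalize (pvALoop (pvSplit response_text "\n") [] PySem.Set.empty)

-- ===== PORT B =====
-- _split_leading: (prefix of non-header lines, rest starting at the first header)
def pvSplitLead : List String → List String × List String
  | [] => ([], [])
  | l :: rest =>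
    if pvIsHeader l = true then ([], l :: rest)
    else
      let p := pvSplitLead rest
      (l :: p.1, p.2)

theorem pvSplitLead_snd_length_le (xs : List String) : (pvSplitLead xs).2.length ≤ xs.length := by
  induction xs with
  | nil => simp [pvSplitLead]
  | cons l rest ih =>
      simp only [pvSplitLead]
      split
      · exact le_refl _
      · exact Nat.le_succ_of_le ih

-- while rest: header, tail = rest[0], rest[1:]; body, rest = _split_leading(tail); sections.append(...)
def pvSections : List String → List (String × List String)
  | [] => []
  | h :: t =>
    let p := pvSplitLead t
    (h, p.1) :: pvSections p.2
termination_by xs => xs.length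
decreasing_by
  exact Nat.lt_succ_of_le (pvSplitLead_snd_length_le t)

-- first = 0; while first < len(leading) and not leading[first]: first += 1; out = leading[first:]
def pvDropEmpty : List String → List String
  | [] => []
  | l :: rest => if l = "" then pvDropEmpty rest else l :: rest

-- for header, body in sections: emit once per key
def pvEmit : List (String × List String) → PySem.Set String → List String
  | [], _ => []
  | (h, body) :: rest, seen =>
    let key := pvHeaderKey h
    if PySem.Set.contains seen key = true then pvEmit rest seen
    else ("## " ++ h) :: (body ++ pvEmit rest (PySem.Set.add seen key))

def post_process_simple_py_alt (response_text : String) (analysis : List (String × String)) : String :=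
  if response_text = "" then response_text
  else
    let lines := (pvSplit response_text "\n").map PySem.Str.strip
    let p := pvSplitLead lines
    pvFinalize (pvDropEmpty p.1 ++ pvEmit (pvSections p.2) PySem.Set.empty)

-- ===== PRECONDITION & SPEC =====
def Spec_post_process_simple_py (response_text : String) (analysis : List (String × String)) (out : String) : Prop := out = post_process_simple_py_alt response_text analysis
instance (response_text : String) (analysis : List (String × String)) (out : String) : Decidable (Spec_post_process_simple_py response_text analysis out) := by unfold Spec_post_process_simple_py; infer_instance

-- ===== CLAIM (what is proved, stated in full; the proofs are below) =====
def Claim_equal_post_process_simple_py : Prop := ∀ (response_text : String) (analysis : List (String × String)), Dom_post_process_simple_py response_text analysis → Spec_post_process_simple_py response_text analysis (post_process_simple_py response_text analysis)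

-- ===== LEMMAS AND PROOFS =====

theorem pvIsHeader_empty : pvIsHeader "" = false := by decide

theorem pvIsHeader_not_hashes (line : String) (h : pvIsHeader line = true) :
    PySem.Str.startswith line "##" = false := by
  unfold pvIsHeader at h
  rw [List.any_eq_true] at h
  obtain ⟨j, hj, hst⟩ := h
  rw [PySem.List.mem_pyRange_one] at hj
  obtain ⟨hj1, hj2⟩ := hj
  by_contra hc
  rw [Bool.not_eq_false] at hc
  rw [PySem.Str.startswith_eq, PySem.Chars.startswith_iff] at hst hc
  rw [show (("##" : String)).toList = ['#', '#'] from by decide] at hc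
  interval_cases j <;>
    [rw [show ((PySem.Int.toStr 1 ++ "." : String)).toList = ['1', '.'] from by decide] at hst;
     rw [show ((PySem.Int.toStr 2 ++ "." : String)).toList = ['2', '.'] from by decide] at hst;
     rw [show ((PySem.Int.toStr 3 ++ "." : String)).toList = ['3', '.'] from by decide] at hst;
     rw [show ((PySem.Int.toStr 4 ++ "." : String)).toList = ['4', '.'] from by decide] at hst;
     rw [show ((PySem.Int.toStr 5 ++ "." : String)).toList = ['5', '.'] from by decide] at hst;
     rw [show ((PySem.Int.toStr 6 ++ "." : String)).toList = ['6', '.'] from by decide] at hst;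
     rw [show ((PySem.Int.toStr 7 ++ "." : String)).toList = ['7', '.'] from by decide] at hst;
     rw [show ((PySem.Int.toStr 8 ++ "." : String)).toList = ['8', '.'] from by decide] at hst;
     rw [show ((PySem.Int.toStr 9 ++ "." : String)).toList = ['9', '.'] from by decide] at hst] <;>
  · obtain ⟨t1, e1⟩ := hst
    obtain ⟨t2, e2⟩ := hc
    rw [← e2] at e1
    simp at e1

theorem pvSkip_map_strip (xs : List String) :
    (pvSkip xs).map PySem.Str.strip = (pvSplitLead (xs.map PySem.Str.strip)).2 := by
  induction xs with
  | nil => simp [pvSkip, pvSplitLead]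
  | cons l rest ih =>
      simp only [pvSkip, List.map_cons, pvSplitLead]
      by_cases h : pvIsHeader (PySem.Str.strip l) = true
      · simp [h]
      · simp [h, ih]

theorem pvSplitLead_snd_fix (xs : List String) :
    pvSplitLead (pvSplitLead xs).2 = ([], (pvSplitLead xs).2) := by
  induction xs with
  | nil => simp [pvSplitLead]
  | cons l rest ih =>
      by_cases h : pvIsHeader l = true
      · simp [pvSplitLead, h]
      · simp [pvSplitLead, h, ih]

theorem pvALoop_eq (n : Nat) : ∀ (raw : List String), raw.length ≤ n →
    ∀ (acc : List String) (seen : PySem.Set String),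
    pvALoop raw acc seen =
      acc ++ (if acc = [] then pvDropEmpty (pvSplitLead (raw.map PySem.Str.strip)).1
              else (pvSplitLead (raw.map PySem.Str.strip)).1)
          ++ pvEmit (pvSections (pvSplitLead (raw.map PySem.Str.strip)).2) seen := by
  induction n with
  | zero =>
      intro raw hlen acc seen
      have hraw : raw = [] := List.eq_nil_of_length_eq_zero (Nat.le_zero.mp hlen)
      subst hraw
      simp [pvALoop, pvSplitLead, pvSections, pvEmit, pvDropEmpty]
  | succ n ih =>
      intro raw hlen acc seen
      cases raw with
      | nil => simp [pvALoop, pvSplitLead, pvSections, pvEmit, pvDropEmpty]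
      | cons l rest =>
        have hrest : rest.length ≤ n := by
          simp only [List.length_cons] at hlen; omega
        by_cases h0 : PySem.Str.strip l = "" ∧ acc = []
        · -- leading empty line, nothing emitted yet: skipped
          obtain ⟨he, ha⟩ := h0
          rw [show pvALoop (l :: rest) acc seen = pvALoop rest acc seen from by
            rw [pvALoop]; rw [if_pos ⟨he, ha⟩]]
          have hh : pvIsHeader (PySem.Str.strip l) = false := by rw [he]; exact pvIsHeader_empty
          rw [ih rest hrest acc seen]
          subst ha
          simp [pvSplitLead, pvIsHeader_empty, pvDropEmpty, he]
        · by_cases h2 : PySem.Str.strip l ≠ "" ∧ pvIsHeader (PySem.Str.strip l) = true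
          · -- header line
            by_cases hc : PySem.Set.contains seen (pvHeaderKey (PySem.Str.strip l)) = true
            · -- duplicate section: A skips to the next header, B drops the section
              rw [show pvALoop (l :: rest) acc seen = pvALoop (pvSkip rest) acc seen from by
                rw [pvALoop]; rw [if_neg h0, if_pos h2, if_pos hc]]
              rw [ih (pvSkip rest) (le_trans (pvSkip_length_le rest) hrest) acc seen]
              rw [pvSkip_map_strip rest, pvSplitLead_snd_fix]
              simp only [List.map_cons, pvSplitLead, h2.2, if_pos]
              rw [show pvSections (PySem.Str.strip l :: rest.map PySem.Str.strip) =
                    (PySem.Str.strip l, (pvSplitLead (rest.map PySem.Str.strip)).1) ::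
                      pvSections (pvSplitLead (rest.map PySem.Str.strip)).2 from by
                rw [pvSections]]
              rw [show pvEmit ((PySem.Str.strip l, (pvSplitLead (rest.map PySem.Str.strip)).1) ::
                      pvSections (pvSplitLead (rest.map PySem.Str.strip)).2) seen =
                    pvEmit (pvSections (pvSplitLead (rest.map PySem.Str.strip)).2) seen from by
                rw [pvEmit]; rw [if_pos hc]]
            · -- new section: A emits the formatted header, then its lines one by one
              have hs : PySem.Str.startswith (PySem.Str.strip l) "##" = false :=
                pvIsHeader_not_hashes _ h2.2
              rw [show pvALoop (l :: rest) acc seen =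
                    pvALoop rest (acc ++ ["## " ++ PySem.Str.strip l])
                      (PySem.Set.add seen (pvHeaderKey (PySem.Str.strip l))) from by
                rw [pvALoop]
                rw [if_neg h0, if_pos h2, if_neg hc, if_pos (by rw [hs]; simp)]]
              rw [ih rest hrest _ _]
              have hne : acc ++ ["## " ++ PySem.Str.strip l] ≠ [] := by simp
              rw [if_neg hne]
              simp only [List.map_cons, pvSplitLead, h2.2, if_pos]
              rw [show pvSections (PySem.Str.strip l :: rest.map PySem.Str.strip) =
                    (PySem.Str.strip l, (pvSplitLead (rest.map PySem.Str.strip)).1) ::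
                      pvSections (pvSplitLead (rest.map PySem.Str.strip)).2 from by
                rw [pvSections]]
              rw [show pvEmit ((PySem.Str.strip l, (pvSplitLead (rest.map PySem.Str.strip)).1) ::
                      pvSections (pvSplitLead (rest.map PySem.Str.strip)).2) seen =
                    ("## " ++ PySem.Str.strip l) ::
                      ((pvSplitLead (rest.map PySem.Str.strip)).1 ++
                        pvEmit (pvSections (pvSplitLead (rest.map PySem.Str.strip)).2)
                          (PySem.Set.add seen (pvHeaderKey (PySem.Str.strip l)))) from by
                rw [pvEmit]; rw [if_neg hc]]
              simp [pvDropEmpty]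
          · -- ordinary content line: appended as is
            have hh : pvIsHeader (PySem.Str.strip l) = false := by
              by_cases hl : PySem.Str.strip l = ""
              · rw [hl]; exact pvIsHeader_empty
              · rcases Bool.eq_false_or_eq_true (pvIsHeader (PySem.Str.strip l)) with ht | hf
                · exact absurd ⟨hl, ht⟩ h2
                · exact hf
            rw [show pvALoop (l :: rest) acc seen = pvALoop rest (acc ++ [PySem.Str.strip l]) seen from by
              rw [pvALoop]; rw [if_neg h0, if_neg h2]]
            rw [ih rest hrest _ _]
            have hne : acc ++ [PySem.Str.strip l] ≠ [] := by simp
            rw [if_neg hne]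
            simp only [List.map_cons, pvSplitLead, hh, Bool.false_eq_true, if_false]
            by_cases ha : acc = []
            · have hl : PySem.Str.strip l ≠ "" := fun hl => h0 ⟨hl, ha⟩
              subst ha
              simp [pvDropEmpty, hl]
            · rw [if_neg ha]
              simp

-- ===== VERDICT (by name: the statement is the Claim_ definition above) =====
theorem post_process_simple_py_spec : Claim_equal_post_process_simple_py := by
  intro response_text analysis _
  unfold Spec_post_process_simple_py post_process_simple_py post_process_simple_py_alt
  by_cases h : response_text = ""
  · simp [h]
  · simp only [h, if_false]
    rw [pvALoop_eq (pvSplit response_text "\n").length _ le_rfl [] PySem.Set.empty]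
    simp
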